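-- pv_equiv track=rewrite | github.com/innewiadro/Codewars | kata_level7/Quicksum/Quicksum.py | quicksum
-- ===== SOURCE A (Python) =====
-- def quicksum(packet):
--     if not packet:
--         return 0
--
--     if packet[0] == " " or packet[-1] == " ":
--         return 0
--
--     for char in packet:
--         if not (char == " " or "A" <= char <= "Z"):
--             return 0
--
--     total = 0
--     for i, char in enumerate(packet, start=1):
--         if char != " ":
--             value = ord(char) - ord('A') + 1
--             total += i * value
--
--     return total
-- ===== SOURCE B (Python) =====
-- def quicksum(packet):
--     if not packet or packet[0] == " " or packet[-1] == " ":
--         return 0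
--     if not all(ch == " " or "A" <= ch <= "Z" for ch in packet):
--         return 0
--     # sum(i * v_i, 1-based) equals the sum over k of the suffix value sum from k,
--     # so accumulate right-to-left with a running suffix sum: no position index needed.
--     total = suffix = 0
--     for ch in reversed(packet):
--         if ch != " ":
--             suffix += ord(ch) - 64
--         total += suffix
--     return total
-- ===== Notes on version B (the rewrite author's own statement) =====
-- stated objective: alternative
-- what changed: B replaces A's position-weighted forward summation by a right-to-left pass maintaining a running suffix value sum (using sum(i*v_i) = sum over k of the suffix sums), so no position index or multiplication appears; validation is a single all() predicate instead of A's loop-with-early-return.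
import Mathlib
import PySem

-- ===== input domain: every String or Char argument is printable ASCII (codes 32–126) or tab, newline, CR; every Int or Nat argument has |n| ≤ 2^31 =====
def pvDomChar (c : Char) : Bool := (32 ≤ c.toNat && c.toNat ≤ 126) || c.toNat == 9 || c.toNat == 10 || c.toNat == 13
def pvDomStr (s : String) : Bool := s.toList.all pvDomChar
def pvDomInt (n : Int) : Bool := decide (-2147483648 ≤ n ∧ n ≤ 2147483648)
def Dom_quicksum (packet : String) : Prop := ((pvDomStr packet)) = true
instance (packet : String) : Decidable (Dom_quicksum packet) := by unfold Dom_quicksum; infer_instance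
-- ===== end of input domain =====

-- B computes the position-weighted sum by a right-to-left pass with a running suffix value sum
-- (Σ i·vᵢ = Σₖ Σ_{i≥k} vᵢ), with no position index; alternative decomposition, same O(n) cost.

-- ===== PORT A =====
-- A's validation loop: 'for char in packet: if not (char == " " or "A" <= char <= "Z"): return 0'
def quicksumValid : List Char → Bool
  | [] => true
  | c :: rest => if ¬ (c = ' ' ∨ ('A' ≤ c ∧ c ≤ 'Z')) then false else quicksumValid rest

-- A's sum loop: 'for i, char in enumerate(packet, start=1): if char != " ": total += i * value'
def quicksumSum : List Char → Int → Int → Int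
  | [], _, total => total
  | c :: rest, i, total =>
    if c ≠ ' ' then quicksumSum rest (i + 1) (total + i * ((c.toNat : Int) - 65 + 1))
    else quicksumSum rest (i + 1) total

def quicksum (packet : String) : Int :=
  let cs := packet.toList
  if cs = [] then 0
  else if PySem.List.pyGet? cs 0 = some ' ' ∨ PySem.List.pyGet? cs (-1) = some ' ' then 0
  else if ¬ quicksumValid cs then 0
  else quicksumSum cs 1 0

-- ===== PORT B =====
-- B's loop body: 'if ch != " ": suffix += ord(ch) - 64; total += suffix' (state = (total, suffix))
def quicksumAltStep (st : Int × Int) (c : Char) : Int × Int :=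
  let s := if c ≠ ' ' then st.2 + ((c.toNat : Int) - 64) else st.2
  (st.1 + s, s)

def quicksum_alt (packet : String) : Int :=
  let cs := packet.toList
  if cs = [] ∨ PySem.List.pyGet? cs 0 = some ' ' ∨ PySem.List.pyGet? cs (-1) = some ' ' then 0
  else if ¬ (cs.all fun c => c == ' ' || (decide ('A' ≤ c) && decide (c ≤ 'Z'))) then 0
  else (cs.reverse.foldl quicksumAltStep (0, 0)).1

-- ===== PRECONDITION & SPEC =====
def Spec_quicksum (packet : String) (out : Int) : Prop := out = quicksum_alt packet
instance (packet : String) (out : Int) : Decidable (Spec_quicksum packet out) := by unfold Spec_quicksum; infer_instance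

-- ===== CLAIM =====
def Claim_equal_quicksum : Prop := ∀ (packet : String), Dom_quicksum packet → Spec_quicksum packet (quicksum packet)

-- ===== LEMMAS AND PROOFS =====

-- letter value of one character (0 for a space)
def qsVal (c : Char) : Int := if c = ' ' then 0 else (c.toNat : Int) - 64

-- plain value sum and 1-based position-weighted sum, as recursive references
def qsSumV : List Char → Int
  | [] => 0
  | c :: rest => qsVal c + qsSumV rest

def qsWSum : List Char → Int
  | [] => 0
  | c :: rest => qsVal c + qsSumV rest + qsWSum rest

-- A's validation pass is the same predicate as B's all(...)
theorem valid_eq_all (cs : List Char) :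
    quicksumValid cs = (cs.all fun c => c == ' ' || (decide ('A' ≤ c) && decide (c ≤ 'Z'))) := by
  induction cs with
  | nil => rfl
  | cons c rest ih =>
    by_cases h : c = ' ' ∨ ('A' ≤ c ∧ c ≤ 'Z') <;>
      simp [quicksumValid, List.all_cons, h, ih]

-- A's forward weighted loop computes the weighted reference sum
theorem sumLoop_eq (cs : List Char) : ∀ (i total : Int),
    quicksumSum cs i total = total + (i - 1) * qsSumV cs + qsWSum cs := by
  induction cs with
  | nil => intro i total; simp [quicksumSum, qsSumV, qsWSum]
  | cons c rest ih =>
    intro i total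
    by_cases h : c = ' '
    · subst h; simp [quicksumSum, qsSumV, qsWSum, qsVal, ih]; ring
    · simp [quicksumSum, h, ih, qsSumV, qsWSum, qsVal]; ring

-- B's right-to-left fold: total gains length·suffix plus the weighted sum; suffix gains the value sum
theorem altFold_eq (cs : List Char) : ∀ (t s : Int),
    cs.reverse.foldl quicksumAltStep (t, s) =
      (t + (cs.length : Int) * s + qsWSum cs, s + qsSumV cs) := by
  induction cs with
  | nil => intro t s; simp [qsSumV, qsWSum]
  | cons c rest ih =>
    intro t s
    rw [List.reverse_cons, List.foldl_append, ih]
    by_cases h : c = ' '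
    · subst h
      simp [List.foldl, quicksumAltStep, qsSumV, qsWSum, qsVal]
      ring
    · simp [List.foldl, quicksumAltStep, h, qsSumV, qsWSum, qsVal]
      refine ⟨by ring, by ring⟩

-- ===== VERDICT =====
theorem quicksum_spec : Claim_equal_quicksum := by
  intro packet _
  unfold Spec_quicksum quicksum quicksum_alt
  by_cases h0 : packet.toList = []
  · simp [h0]
  · by_cases h1 : PySem.List.pyGet? packet.toList 0 = some ' ' ∨ PySem.List.pyGet? packet.toList (-1) = some ' '
    · simp [h0, h1]
    · simp only [h0, h1, or_false, if_false]
      rw [← valid_eq_all]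
      cases hv : quicksumValid packet.toList with
      | false => simp
      | true =>
        simp only [not_true, ite_false]
        rw [sumLoop_eq, altFold_eq]
        simp
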